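-- pv_equiv track=rewrite | github.com/alankarj/cross_lingual_ner | src/util/annotation_evaluation.py | process_annotations
-- ===== SOURCE A (Python) =====
-- import copy
--
-- def process_annotations(tag_list):
--     new_tag_list = copy.deepcopy(tag_list)
--     for i, tags in enumerate(tag_list):
--         prev_type = None
--         for j, curr_tag in enumerate(tags):
--             if curr_tag.startswith("I"):
--                 curr_type = curr_tag.split("-")[1]
--                 if curr_type != prev_type:
--                     new_tag_list[i][j] = "B-" + curr_type
--             elif curr_tag.startswith("B"):
--                 curr_type = curr_tag.split("-")[1]
--             else:
--                 curr_type = None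
--             prev_type = curr_type
--     return new_tag_list
-- ===== SOURCE B (Python) =====
-- def process_annotations(tag_list):
--     def get_type(tag):
--         if tag.startswith("B") or tag.startswith("I"):
--             return tag.split("-")[1]
--         return None
--
--     def fix(prev, curr):
--         if curr.startswith("I"):
--             t = curr.split("-")[1]
--             if prev is None or get_type(prev) != t:
--                 return "B-" + t
--         return curr
--
--     return [[fix(p, c) for p, c in zip([None] + row, row)] for row in tag_list]
-- ===== Notes on version B (the rewrite author's own statement) =====
-- stated objective: alternative
-- what changed: Replaces the threaded prev_type accumulator and in-place deepcopy mutation with a stateless pairwise pass: each output tag is computed from (previous original tag, current tag) via a local get_type lookback, built with zip/comprehensions.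
import Mathlib
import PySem

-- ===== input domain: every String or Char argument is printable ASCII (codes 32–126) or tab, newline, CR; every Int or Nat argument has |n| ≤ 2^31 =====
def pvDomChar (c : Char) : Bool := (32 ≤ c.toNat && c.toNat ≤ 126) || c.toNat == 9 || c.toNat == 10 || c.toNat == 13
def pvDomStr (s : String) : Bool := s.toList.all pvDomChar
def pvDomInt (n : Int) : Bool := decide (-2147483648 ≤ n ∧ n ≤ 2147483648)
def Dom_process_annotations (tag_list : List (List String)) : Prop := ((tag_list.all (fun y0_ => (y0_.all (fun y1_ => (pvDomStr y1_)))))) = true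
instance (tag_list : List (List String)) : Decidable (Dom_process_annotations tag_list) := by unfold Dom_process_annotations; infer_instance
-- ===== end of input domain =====

-- B replaces A's threaded prev_type state (and in-place deepcopy mutation) with a stateless
-- pairwise lookback pass built with zip; same cost. Equivalence is about the RETURN value
-- (A mutates only its own deepcopy, so no caller-visible mutation differs).


-- ===== PORT A =====
-- tag.split("-")[1]: under Pre_ the tag contains "-", so index 1 exists and the defaults
-- below are never reached inside Pre_ (outside Pre_ Python raises IndexError).
def pvSplitType (tag : String) : String :=
  String.ofList (PySem.List.pyGetD (PySem.Chars.splitOn tag.toList ['-']) 1 [])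

-- the body of A's inner loop: state = (new row built so far, prev_type)
def pvStepA (st : List String × Option String) (curr : String) : List String × Option String :=
  if PySem.Str.startswith curr "I" then
    let t := pvSplitType curr
    if some t ≠ st.2 then (st.1 ++ ["B-" ++ t], some t)
    else (st.1 ++ [curr], some t)
  else if PySem.Str.startswith curr "B" then
    (st.1 ++ [curr], some (pvSplitType curr))
  else (st.1 ++ [curr], none)

-- A's inner loop; rows are independent (A mutates a deepcopy row by row, which equals
-- building each new row left to right).
def pvRowA (tags : List String) : List String :=
  (tags.foldl pvStepA ([], none)).1

def process_annotations (tag_list : List (List String)) : List (List String) :=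
  tag_list.map pvRowA

-- ===== PORT B =====
def pvGetType (tag : String) : Option String :=
  if PySem.Str.startswith tag "B" || PySem.Str.startswith tag "I" then
    some (pvSplitType tag)
  else none

def pvFix (prev : Option String) (curr : String) : String :=
  if PySem.Str.startswith curr "I" then
    let t := pvSplitType curr
    match prev with
    | none => "B-" ++ t
    | some p => if pvGetType p ≠ some t then "B-" ++ t else curr
  else curr

def process_annotations_alt (tag_list : List (List String)) : List (List String) :=
  tag_list.map (fun row =>
    ((none :: row.map some).zip row).map (fun pc => pvFix pc.1 pc.2))

-- ===== PRECONDITION & SPEC =====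
-- Pre_ excludes exactly the inputs on which Python A raises IndexError: a tag starting
-- with "I" or "B" but containing no "-" makes tag.split("-")[1] raise.
def Pre_process_annotations (tag_list : List (List String)) : Prop :=
  ∀ row ∈ tag_list, ∀ tag ∈ row,
    (PySem.Str.startswith tag "I" = true ∨ PySem.Str.startswith tag "B" = true) →
    PySem.Str.isIn "-" tag = true
instance (tag_list : List (List String)) : Decidable (Pre_process_annotations tag_list) := by unfold Pre_process_annotations; infer_instance

def pvWitness_process_annotations : List (List String) :=
  [["B-PER", "I-PER", "O", "I-LOC"], ["I-PER"]]

def Spec_process_annotations (tag_list : List (List String)) (out : List (List String)) : Prop := out = process_annotations_alt tag_list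
instance (tag_list : List (List String)) (out : List (List String)) : Decidable (Spec_process_annotations tag_list out) := by unfold Spec_process_annotations; infer_instance

-- ===== CLAIM (what is proved, stated in full; the proofs are below) =====
def Claim_equal_process_annotations : Prop := ∀ (tag_list : List (List String)), Dom_process_annotations tag_list → Pre_process_annotations tag_list → Spec_process_annotations tag_list (process_annotations tag_list)

-- ===== LEMMAS AND PROOFS =====

-- One step of A's fold, seen from B's side: if A's prev_type state equals B's
-- get_type of the previous original tag, the step appends exactly pvFix prev curr
-- and the new state is get_type of the current tag.
theorem pvStep_eq (acc : List String) (prevTag : Option String) (c : String) :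
    pvStepA (acc, prevTag.bind pvGetType) c = (acc ++ [pvFix prevTag c], pvGetType c) := by
  by_cases hI : PySem.Str.startswith c "I" = true
  · have hg : pvGetType c = some (pvSplitType c) := by
      unfold pvGetType
      rw [if_pos]
      rw [hI, Bool.or_true]
    cases prevTag with
    | none =>
        unfold pvStepA pvFix
        rw [if_pos hI, if_pos hI, hg]
        simp
    | some p =>
        unfold pvStepA pvFix
        rw [if_pos hI, if_pos hI, hg]
        by_cases h : pvGetType p = some (pvSplitType c)
        · simp [h]
        · have h' : ¬ (some (pvSplitType c) = pvGetType p) := fun e => h e.symm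
          simp [h, h']
  · have hfix : pvFix prevTag c = c := by unfold pvFix; rw [if_neg hI]
    by_cases hB : PySem.Str.startswith c "B" = true
    · have hg : pvGetType c = some (pvSplitType c) := by
        unfold pvGetType; rw [if_pos]; rw [hB, Bool.true_or]
      unfold pvStepA
      rw [if_neg hI, if_pos hB, hfix, hg]
    · have hg : pvGetType c = none := by
        have hcond : ¬ ((PySem.Str.startswith c "B" || PySem.Str.startswith c "I") = true) := by
          rw [Bool.or_eq_true]
          rintro (hb | hi)
          · exact hB hb
          · exact hI hi
        unfold pvGetType
        rw [if_neg hcond]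
      unfold pvStepA
      rw [if_neg hI, if_neg hB, hfix, hg]

-- A's fold over a row equals B's pairwise pass, with the previous tag generalized.
theorem pvRow_eq (row : List String) (acc : List String) (prevTag : Option String) :
    (row.foldl pvStepA (acc, prevTag.bind pvGetType)).1
      = acc ++ ((prevTag :: row.map some).zip row).map (fun pc => pvFix pc.1 pc.2) := by
  induction row generalizing acc prevTag with
  | nil => simp
  | cons c rest ih =>
      rw [List.foldl_cons, pvStep_eq]
      have hbind : pvGetType c = (some c).bind pvGetType := rfl
      rw [hbind, ih (acc ++ [pvFix prevTag c]) (some c)]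
      simp

theorem process_annotations_eq (tag_list : List (List String)) :
    process_annotations tag_list = process_annotations_alt tag_list := by
  unfold process_annotations process_annotations_alt
  apply List.map_congr_left
  intro row _
  have h := pvRow_eq row [] none
  simpa [pvRowA] using h

-- ===== VERDICT (by name: the statement is the Claim_ definition above) =====
theorem process_annotations_spec : Claim_equal_process_annotations := by
  intro tag_list _ _
  unfold Spec_process_annotations
  exact process_annotations_eq tag_list
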